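-- pv_equiv track=rewrite | github.com/MamMark/mm | tools/utils/tagcore/tagcore/chip_utils.py | expand_satmask
-- ===== SOURCE A (Python) =====
-- def expand_satmask(satmask):
--     if satmask == 0:
--         return ''
--     sat_str = ''
--     sep = ''
--     for i in range(32):
--         if satmask & (1<<i):
--             sat_str = sat_str + sep + '{:02d}'.format(i + 1)
--             sep = ' '
--     return sat_str
-- ===== SOURCE B (Python) =====
-- def expand_satmask(satmask):
--     m = satmask & 0xFFFFFFFF
--     parts = []
--     while m:
--         lsb = m & -m
--         parts.append('{:02d}'.format(lsb.bit_length()))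
--         m &= m - 1
--     return ' '.join(parts)
-- ===== Notes on version B (the rewrite author's own statement) =====
-- stated objective: idiomatic
-- what changed: B restricts the mask to A's fixed bit window once, then loops only over the set bits - isolating the lowest set bit with m & -m, reading its one-based position via bit_length, clearing it with m &= m-1 - collecting the pieces in a list joined once, instead of A's fixed full-window scan that grows a string with a separator-state variable.
import Mathlib
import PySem

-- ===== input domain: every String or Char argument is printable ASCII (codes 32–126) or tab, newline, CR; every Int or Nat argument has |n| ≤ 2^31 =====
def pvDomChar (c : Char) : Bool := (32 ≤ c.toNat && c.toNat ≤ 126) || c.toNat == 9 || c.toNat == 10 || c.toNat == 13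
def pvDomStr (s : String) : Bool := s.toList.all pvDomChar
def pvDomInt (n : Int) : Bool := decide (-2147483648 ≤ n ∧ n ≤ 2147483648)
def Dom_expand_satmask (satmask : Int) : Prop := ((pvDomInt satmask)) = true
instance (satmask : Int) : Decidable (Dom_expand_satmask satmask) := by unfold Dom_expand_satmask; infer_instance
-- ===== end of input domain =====

-- B replaces A's fixed 32-step scan-with-separator-state by a loop over the set bits only
-- (lowest-set-bit isolation + bit_length), collecting pieces into a list joined once.

-- '{:02d}'.format(n) for a nonnegative int n (both Pythons format only values 1..32 with it)
def pvFmt02 (n : Int) : String := PySem.Str.zfill (PySem.Int.toStr n) 2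

-- ===== PORT A =====
def expand_satmask (satmask : Int) : String :=
  if satmask = 0 then ""
  else
    -- sat_str, sep accumulated over for i in range(32); the pair's first component is sat_str
    ((PySem.List.pyRange 0 32 1).foldl
      (fun (st : String × String) i =>
        if PySem.Int.band satmask (1 <<< i.toNat) ≠ 0 then  -- i ∈ [0,32), so i.toNat is exact
          (st.1 ++ st.2 ++ pvFmt02 (i + 1), " ")
        else st)
      ("", "")).1

-- ===== PORT B =====
-- the while-m loop of Source B; fuel 32 only makes the loop structural (m has at most 32 set bits)
def pvAltLoop : Nat → Int → List String
  | 0, _ => []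
  | fuel + 1, m =>
    if m = 0 then []
    else
      let lsb := PySem.Int.band m (-m)
      pvFmt02 ((PySem.Int.bitLength lsb : Nat) : Int) :: pvAltLoop fuel (PySem.Int.band m (m - 1))

def expand_satmask_alt (satmask : Int) : String :=
  PySem.Str.join " " (pvAltLoop 32 (PySem.Int.band satmask 4294967295))

-- ===== PRECONDITION & SPEC =====
def Spec_expand_satmask (satmask : Int) (out : String) : Prop := out = expand_satmask_alt satmask
instance (satmask : Int) (out : String) : Decidable (Spec_expand_satmask satmask out) := by unfold Spec_expand_satmask; infer_instance

-- ===== CLAIM (what is proved, stated in full; the proofs are below) =====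
def Claim_equal_expand_satmask : Prop := ∀ (satmask : Int), Dom_expand_satmask satmask → Spec_expand_satmask satmask (expand_satmask satmask)

-- ===== LEMMAS AND PROOFS =====

-- the ascending list of set-bit indices of the 32-bit value, and the common normal form
def pvBits (n : Nat) : List Nat := (List.range 32).filter n.testBit
def pvT (n : Nat) : String :=
  PySem.Str.join " " ((pvBits n).map (fun i : Nat => pvFmt02 ((i : Int) + 1)))

theorem pv_join_nil : PySem.Str.join " " ([] : List String) = "" := by
  apply String.ext; simp [PySem.Str.toList_join, PySem.Chars.join_nil]

theorem pv_chars_join_append (L : List (List Char)) (x : List Char) :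
    PySem.Chars.join [' '] (L ++ [x])
      = PySem.Chars.join [' '] L ++ (if L = [] then [] else [' ']) ++ x := by
  induction L with
  | nil => simp [PySem.Chars.join_nil, PySem.Chars.join_singleton]
  | cons a L ih =>
    cases L with
    | nil =>
      simp [PySem.Chars.join_singleton, PySem.Chars.join_cons_cons]
    | cons b L' =>
      rw [List.cons_append, List.cons_append, PySem.Chars.join_cons_cons,
          PySem.Chars.join_cons_cons, ← List.cons_append, ih]
      simp [List.append_assoc]

theorem pv_join_append (l : List String) (x : String) :
    PySem.Str.join " " (l ++ [x])
      = PySem.Str.join " " l ++ (if l = [] then "" else " ") ++ x := by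
  apply String.ext
  simp only [String.toList_append, PySem.Str.toList_join, List.map_append, List.map]
  have hs : " ".toList = [' '] := by decide
  rw [hs, pv_chars_join_append (l.map String.toList) x.toList]
  cases l <;> simp

theorem pv_foldJoin (p : Nat → Prop) [DecidablePred p] (F : Nat → String) (N : Nat) :
    (List.range N).foldl
        (fun (st : String × String) i => if p i then (st.1 ++ st.2 ++ F i, " ") else st)
        ("", "")
      = (PySem.Str.join " " (((List.range N).filter (fun j => decide (p j))).map F),
         if ((List.range N).filter (fun j => decide (p j))) = [] then "" else " ") := by
  induction N with
  | zero => simp [pv_join_nil]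
  | succ N ih =>
    rw [List.range_succ, List.foldl_append, ih, List.filter_append]
    by_cases hp : p N
    · have hfN : List.filter (fun j => decide (p j)) [N] = [N] := by simp [hp]
      rw [hfN, List.map_append, List.map_singleton, pv_join_append]
      simp only [List.foldl_cons, List.foldl_nil, if_pos hp]
      refine Prod.ext ?_ (by simp)
      simp only [List.map_eq_nil_iff]
    · simp [hp, List.filter]

-- bits of (2^N - 1) - r are the complement of r's bits below N
theorem pv_compl_testBit (i : Nat) : ∀ (N r : Nat), r < 2 ^ N →
    (2 ^ N - 1 - r).testBit i = (decide (i < N) && !r.testBit i) := by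
  induction i with
  | zero =>
    intro N r hr
    cases N with
    | zero =>
      interval_cases r
      simp
    | succ s =>
      have h2 : 2 ^ (s + 1) = 2 * 2 ^ s := by ring
      have hP : 0 < 2 ^ s := Nat.two_pow_pos _
      simp only [Nat.testBit_zero]
      have : (2 ^ (s + 1) - 1 - r) % 2 = 1 - r % 2 := by omega
      rw [this]
      rcases Nat.mod_two_eq_zero_or_one r with h | h <;> simp [h]
  | succ i ihw =>
    intro N r hr
    cases N with
    | zero =>
      have : r = 0 := by omega
      simp [this, Nat.zero_testBit]
    | succ s =>
      have h2 : 2 ^ (s + 1) = 2 * 2 ^ s := by ring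
      have hP : 0 < 2 ^ s := Nat.two_pow_pos _
      rw [Nat.testBit_succ, Nat.testBit_succ]
      have hq : (2 ^ (s + 1) - 1 - r) / 2 = 2 ^ s - 1 - r / 2 := by omega
      rw [hq, ihw s (r / 2) (by omega)]
      congr 1
      simp

-- A's bit test, for i < 32, reads exactly bit i of the masked value
theorem pv_maskBits (satmask : Int) (i : Nat) (hi : i < 32) :
    (PySem.Int.band satmask ((1 : Int) <<< i) ≠ 0)
      ↔ ((PySem.Int.band satmask 4294967295).toNat).testBit i := by
  have hsh : ((1 : Int) <<< i) = ((2 ^ i : Nat) : Int) := by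
    rw [Int.shiftLeft_eq]; push_cast; ring
  have hmask : ((4294967295 : Int)) = ((4294967295 : Nat) : Int) := by norm_num
  have hm32 : (4294967295 : Nat) = 2 ^ 32 - 1 := by norm_num
  by_cases h : 0 ≤ satmask
  · obtain ⟨s, rfl⟩ := Int.eq_ofNat_of_zero_le h
    rw [hsh, hmask, PySem.Int.band_natCast, PySem.Int.band_natCast, Int.toNat_natCast,
        Nat.and_two_pow, Nat.testBit_land, hm32, Nat.testBit_two_pow_sub_one]
    cases hb : s.testBit i <;> simp [hi]
  · have hneg : PySem.Int.band satmask ((2 ^ i : Nat) : Int)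
        = ((2 ^ i - (2 ^ i &&& (-satmask - 1).toNat) : Nat) : Int) := by
      unfold PySem.Int.band
      rw [if_neg h, if_pos (by positivity)]
      simp only [Int.toNat_natCast]
    have hneg2 : PySem.Int.band satmask 4294967295
        = ((4294967295 - (4294967295 &&& (-satmask - 1).toNat) : Nat) : Int) := by
      unfold PySem.Int.band
      rw [if_neg h, if_pos (by norm_num)]
      norm_num [Int.toNat_natCast]
      have h47 : Int.toNat 4294967295 = 4294967295 := by decide
      rw [h47]
    set t := (-satmask - 1).toNat with ht
    rw [hsh, hneg, hneg2, Int.toNat_natCast]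
    have hx : (4294967295 &&& t) < 2 ^ 32 := by
      have := Nat.and_le_left (n := 4294967295) (m := t)
      omega
    have hrw : (4294967295 - (4294967295 &&& t)) = 2 ^ 32 - 1 - (4294967295 &&& t) := by
      omega
    rw [hrw, pv_compl_testBit i 32 _ hx, Nat.testBit_land, hm32,
        Nat.testBit_two_pow_sub_one, Nat.two_pow_and]
    cases hb : t.testBit i <;> simp [hi]


-- bit_length of a power of two
theorem pv_bitLen_pow (k : Nat) : PySem.Int.bitLength ((2 ^ k : Nat) : Int) = k + 1 := by
  induction k with
  | zero => decide
  | succ k ih =>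
    rw [PySem.Int.bitLength_natCast (Nat.two_pow_pos _)]
    have : 2 ^ (k + 1) / 2 = 2 ^ k := by
      rw [pow_succ, Nat.mul_div_cancel _ (by norm_num)]
    rw [this, ih]

-- clearing the lowest set bit: n & (n-1) with n = 2^(k+1)q + 2^k
theorem pv_clear_lsb (k q : Nat) :
    (2 ^ (k + 1) * q + 2 ^ k) &&& (2 ^ (k + 1) * q + 2 ^ k - 1) = 2 ^ (k + 1) * q := by
  have hk : 0 < 2 ^ k := Nat.two_pow_pos _
  have hlt : 2 ^ k < 2 ^ (k + 1) := by
    have : 2 ^ (k + 1) = 2 * 2 ^ k := by ring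
    omega
  have hpred : 2 ^ (k + 1) * q + 2 ^ k - 1 = 2 ^ (k + 1) * q + (2 ^ k - 1) := by omega
  rw [hpred]
  apply Nat.eq_of_testBit_eq
  intro j
  rw [Nat.testBit_land,
      Nat.testBit_two_pow_mul_add q hlt j,
      Nat.testBit_two_pow_mul_add q (show 2 ^ k - 1 < 2 ^ (k + 1) by omega) j]
  rw [Nat.testBit_two_pow_mul]
  split_ifs with hj
  · rw [Nat.testBit_two_pow, Nat.testBit_two_pow_sub_one]
    have hge : ¬ (j ≥ k + 1) := by omega
    simp only [hge, decide_false, Bool.false_and]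
    rcases Nat.lt_or_ge j k with h | h
    · simp [Nat.ne_of_gt h, h]
    · have h1 : ¬ (j < k) := by omega
      simp [h1]
  · have hge : j ≥ k + 1 := by omega
    simp only [hge, decide_true, Bool.true_and]
    exact Bool.and_self _

-- filter over range N: replacing p by pq which agrees above k, is false at and below k,
-- while p is false below k and true at k, pulls out k
theorem pv_filter_cons (k : Nat) (p pq : Nat → Bool)
    (hpl : ∀ j, j < k → p j = false) (hql : ∀ j, j ≤ k → pq j = false)
    (hpk : p k = true) (hag : ∀ j, k < j → p j = pq j) :
    ∀ N, k + 1 ≤ N → (List.range N).filter p = k :: (List.range N).filter pq := by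
  intro N hN
  induction N, hN using Nat.le_induction with
  | base =>
    rw [List.range_succ, List.filter_append, List.filter_append]
    have h1 : (List.range k).filter p = [] := by
      rw [List.filter_eq_nil_iff]; intro a ha
      simp [hpl a (List.mem_range.mp ha)]
    have h2 : (List.range k).filter pq = [] := by
      rw [List.filter_eq_nil_iff]; intro a ha
      simp [hql a (Nat.le_of_lt (List.mem_range.mp ha))]
    simp [h1, h2, List.filter, hpk, hql k (le_refl k)]
  | succ N hN ih =>
    rw [List.range_succ, List.filter_append, List.filter_append, ih]
    have : p N = pq N := hag N (by omega)
    simp [List.filter, this]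

-- bits of n, n > 0, n = 2^(k+1)q + 2^k : head k, tail = bits of cleared value
theorem pv_bits_cons (k q : Nat) (hk : k < 32) :
    pvBits (2 ^ (k + 1) * q + 2 ^ k) = k :: pvBits (2 ^ (k + 1) * q) := by
  have hlt : 2 ^ k < 2 ^ (k + 1) := by
    have : 2 ^ (k + 1) = 2 * 2 ^ k := by ring
    have := Nat.two_pow_pos k
    omega
  apply pv_filter_cons k _ _ _ _ _ _ 32 hk
  · intro j hj
    rw [Nat.testBit_two_pow_mul_add q hlt j, if_pos (by omega), Nat.testBit_two_pow]
    simp; omega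
  · intro j hj
    rw [Nat.testBit_two_pow_mul]
    simp only [show ¬ (j ≥ k + 1) by omega, decide_false, Bool.false_and]
  · rw [Nat.testBit_two_pow_mul_add q hlt k, if_pos (by omega), Nat.testBit_two_pow]
    simp
  · intro j hj
    rw [Nat.testBit_two_pow_mul_add q hlt j, Nat.testBit_two_pow_mul,
        if_neg (by omega)]
    simp only [show j ≥ k + 1 by omega, decide_true, Bool.true_and]

-- B's loop computes the pieces for the set bits, in ascending order
theorem pv_altLoop_eq : ∀ (f n : Nat), n < 2 ^ 32 → (pvBits n).length ≤ f →
    pvAltLoop f (n : Int) = (pvBits n).map (fun i : Nat => pvFmt02 ((i : Int) + 1)) := by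
  intro f
  induction f with
  | zero =>
    intro n _ hl
    have : pvBits n = [] := List.eq_nil_of_length_eq_zero (by omega)
    simp [pvAltLoop, this]
  | succ f ih =>
    intro n hn hl
    by_cases hn0 : n = 0
    · subst hn0
      have : pvBits 0 = [] := by
        unfold pvBits
        rw [List.filter_eq_nil_iff]; intro a _; simp [Nat.zero_testBit]
      simp [pvAltLoop, this]
    · obtain ⟨k, m, hm, hnm⟩ := Nat.exists_eq_two_pow_mul_odd hn0
      obtain ⟨qq, hq⟩ := hm
      have hdec : n = 2 ^ (k + 1) * qq + 2 ^ k := by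
        subst hnm; subst hq; ring
      have hk2 : 0 < 2 ^ k := Nat.two_pow_pos _
      have hk32 : k < 32 := by
        have h1 : 2 ^ k ≤ n := by rw [hdec]; nlinarith [Nat.zero_le (2 ^ (k + 1) * qq)]
        have : (2:Nat) ^ k < 2 ^ 32 := lt_of_le_of_lt h1 hn
        exact (Nat.pow_lt_pow_iff_right (by norm_num)).mp this
      have hc : ((n : Int)) ≠ 0 := by exact_mod_cast hn0
      have hsub : ((n : Int)) - 1 = ((n - 1 : Nat) : Int) := by
        have : 1 ≤ n := by omega
        push_cast [this]; ring
      have hland : n &&& (n - 1) = 2 ^ (k + 1) * qq := by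
        rw [hdec]; exact pv_clear_lsb k qq
      have hb1 : PySem.Int.band (n : Int) ((n : Int) - 1) = ((2 ^ (k + 1) * qq : Nat) : Int) := by
        rw [hsub, PySem.Int.band_natCast, hland]
      have hbneg : PySem.Int.band (n : Int) (-(n : Int)) = ((2 ^ k : Nat) : Int) := by
        unfold PySem.Int.band
        rw [if_pos (by positivity), if_neg (by omega)]
        have h1 : (-(-(n : Int)) - 1).toNat = n - 1 := by omega
        have h2 : ((n : Int)).toNat = n := Int.toNat_natCast n
        rw [h1, h2]
        congr 1
        rw [hland]
        omega
      rw [pvAltLoop, if_neg hc]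
      show pvFmt02 ((PySem.Int.bitLength (PySem.Int.band (n : Int) (-(n : Int))) : Nat) : Int)
            :: pvAltLoop f (PySem.Int.band (n : Int) ((n : Int) - 1))
          = _
      rw [hb1, hbneg, pv_bitLen_pow,
          ih (2 ^ (k + 1) * qq) (by omega) (by
            have := pv_bits_cons k qq hk32
            rw [hdec] at hl
            rw [this] at hl
            simpa using Nat.le_of_succ_le_succ hl)]
      have hbits := pv_bits_cons k qq hk32
      rw [hdec, hbits, List.map_cons]
      congr 1

-- the masked value is a 32-bit natural
theorem pv_masked_lt (satmask : Int) : (PySem.Int.band satmask 4294967295).toNat < 2 ^ 32 := by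
  unfold PySem.Int.band
  by_cases h : 0 ≤ satmask
  · simp only [h, if_true, show (0:Int) ≤ 4294967295 by norm_num, if_true, Int.toNat_natCast]
    have := Nat.and_le_right (n := satmask.toNat) (m := (4294967295:Int).toNat)
    have h2 : ((4294967295:Int)).toNat = 4294967295 := by decide
    omega
  · simp only [h, if_false, show (0:Int) ≤ 4294967295 by norm_num, if_true, Int.toNat_natCast]
    have h2 : ((4294967295:Int)).toNat = 4294967295 := by decide
    omega

theorem pv_masked_nonneg (satmask : Int) : 0 ≤ PySem.Int.band satmask 4294967295 := by
  unfold PySem.Int.band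
  split_ifs
  · simp_all
  · simp_all
  · simp_all
  · simp_all

-- both sides equal pvT of the masked value
theorem pv_main (satmask : Int) : expand_satmask satmask = expand_satmask_alt satmask := by
  have hmn := pv_masked_nonneg satmask
  have hml := pv_masked_lt satmask
  set m := (PySem.Int.band satmask 4294967295).toNat with hm
  have hcast : PySem.Int.band satmask 4294967295 = (m : Int) := by omega
  have hB : expand_satmask_alt satmask = pvT m := by
    unfold expand_satmask_alt pvT
    rw [hcast, pv_altLoop_eq 32 m hml (le_trans (List.length_filter_le _ _) (by simp))]
  rw [hB]
  by_cases h0 : satmask = 0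
  · subst h0
    have hb0 : PySem.Int.band 0 4294967295 = 0 := by decide
    have hm0 : m = 0 := by rw [hm, hb0]; rfl
    have hbits0 : pvBits 0 = [] := by
      unfold pvBits
      rw [List.filter_eq_nil_iff]; intro a _; simp [Nat.zero_testBit]
    rw [expand_satmask, if_pos rfl, hm0]
    unfold pvT
    rw [hbits0]
    simp [pv_join_nil]
  · rw [expand_satmask, if_neg h0]
    have hr : PySem.List.pyRange 0 32 1 = (List.range 32).map (Nat.cast) := by decide
    rw [hr, List.foldl_map]
    simp only [Int.toNat_natCast]
    have hcast2 : ∀ j : Nat, ((1 <<< j : Nat) : Int) = (1 : Int) <<< j := by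
      intro j; rw [Nat.shiftLeft_eq, Int.shiftLeft_eq]; push_cast; ring
    simp only [hcast2]
    rw [pv_foldJoin (fun j : Nat => PySem.Int.band satmask ((1 : Int) <<< j) ≠ 0)
        (fun j : Nat => pvFmt02 ((j : Int) + 1)) 32]
    have hf : (List.range 32).filter
          (fun j : Nat => decide (PySem.Int.band satmask ((1 : Int) <<< j) ≠ 0))
        = (List.range 32).filter m.testBit := by
      apply List.filter_congr
      intro j hj
      have hj32 : j < 32 := List.mem_range.mp hj
      have hmb := pv_maskBits satmask j hj32
      rw [← hm] at hmb
      cases hb : Nat.testBit m j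
      · simp only [hb, Bool.false_eq_true, iff_false] at hmb
        exact decide_eq_false hmb
      · simp only [hb, iff_true] at hmb
        exact decide_eq_true hmb
    rw [hf]
    rfl

-- ===== VERDICT (by name: the statement is the Claim_ definition above) =====
theorem expand_satmask_spec : Claim_equal_expand_satmask := by
  intro satmask _
  unfold Spec_expand_satmask
  exact pv_main satmask
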